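-- pv_equiv track=rewrite | github.com/dbeglaryan/FrostPrompt | src/tagger.py | tag_prompt
-- ===== SOURCE A (Python) =====
-- STYLE_RULES = {
--     "photography": ["photo", "photograph", "camera", "lens", "f/", "dslr", "shot on", "canon", "nikon", "fujifilm", "sony", "hasselblad"],
--     "cinematic": ["cinematic", "film still", "movie scene", "anamorphic", "widescreen", "film grain"],
--     "anime": ["anime", "manga", "japanese animation", "cel-shaded", "studio ghibli", "shonen", "shoujo"],
--     "illustration": ["illustration", "illustrated", "digital art", "concept art", "hand-drawn", "digital painting"],
--     "3d-render": ["3d render", "3d model", "blender", "octane", "unreal engine", "c4d", "cinema 4d", "ray tracing"],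
--     "pixel-art": ["pixel art", "pixelated", "8-bit", "16-bit", "retro game", "sprite"],
--     "watercolor": ["watercolor", "watercolour", "aquarelle", "wet media", "watercolor painting"],
--     "oil-painting": ["oil painting", "oil on canvas", "impasto", "brushstroke", "classical painting"],
--     "minimalist": ["minimalist", "minimal", "clean design", "simple", "negative space", "flat design"],
--     "cyberpunk": ["cyberpunk", "neon", "dystopian", "holographic", "futuristic city"],
--     "retro": ["retro", "vintage", "nostalgia", "old-school", "analog", "70s", "80s", "90s"],
--     "sketch": ["sketch", "line art", "pencil", "charcoal", "drawing", "ink drawing"],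
--     "isometric": ["isometric", "diorama", "tilt-shift", "miniature"],
--     "chibi": ["chibi", "kawaii", "q-style", "cute character", "super deformed"],
--     "surreal": ["surreal", "surrealism", "dreamlike", "impossible", "dali", "escher"],
--     "pop-art": ["pop art", "andy warhol", "comic book", "halftone", "bold colors"],
--     "gothic": ["gothic", "dark fantasy", "macabre", "dark aesthetic"],
--     "steampunk": ["steampunk", "clockwork", "victorian", "brass", "gears"],
--     "vaporwave": ["vaporwave", "synthwave", "retrowave", "neon grid", "aesthetic"],
--     "art-nouveau": ["art nouveau", "art deco", "mucha", "ornamental"],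
-- }
--
-- USECASE_RULES = {
--     "product-marketing": ["product", "commercial", "advertisement", "brand", "packaging", "marketing", "mockup"],
--     "social-media": ["social media", "instagram", "twitter", "tiktok", "post", "story", "feed", "reel"],
--     "youtube-thumbnail": ["youtube", "thumbnail", "video cover", "clickbait"],
--     "profile-avatar": ["profile", "avatar", "headshot", "pfp", "profile picture"],
--     "poster-flyer": ["poster", "flyer", "banner", "billboard", "signage", "placard"],
--     "infographic": ["infographic", "diagram", "chart", "educational", "data viz", "flowchart", "timeline"],
--     "ecommerce": ["ecommerce", "e-commerce", "product listing", "shop", "store", "amazon", "listing"],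
--     "game-asset": ["game", "game asset", "sprite", "character design", "weapon design", "rpg"],
--     "storyboard": ["storyboard", "comic", "panel", "sequence", "narrative", "comic strip"],
--     "app-design": ["app", "ui design", "ux", "interface", "web design", "wireframe", "dashboard"],
--     "logo": ["logo", "brand mark", "emblem", "icon design", "wordmark", "monogram"],
--     "fashion": ["fashion", "outfit", "clothing", "apparel", "runway", "editorial fashion"],
--     "food": ["food", "drink", "beverage", "recipe", "culinary", "restaurant", "cafe"],
--     "architecture": ["architecture", "interior", "building", "room design", "house", "office space"],
--     "landscape": ["landscape", "nature", "scenery", "mountain", "ocean", "forest", "sunset"],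
--     "typography": ["typography", "text design", "lettering", "font", "calligraphy", "type"],
--     "quote-card": ["quote", "motivational", "inspirational", "verse", "saying"],
--     "meme": ["meme", "funny", "humor", "reaction", "viral"],
--     "wallpaper": ["wallpaper", "desktop", "phone wallpaper", "background"],
-- }
--
-- SUBJECT_RULES = {
--     "portrait": ["portrait", "face", "headshot", "selfie", "close-up face"],
--     "character": ["character", "oc", "original character", "fictional", "fantasy character"],
--     "product": ["product", "item", "object", "device", "gadget", "bottle", "jar", "package"],
--     "animal": ["animal", "creature", "pet", "dog", "cat", "bird", "wildlife", "dragon"],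
--     "vehicle": ["vehicle", "car", "motorcycle", "spaceship", "aircraft", "boat", "truck"],
--     "architecture": ["building", "house", "interior", "room", "skyscraper", "castle", "temple"],
--     "landscape": ["landscape", "mountain", "ocean", "forest", "desert", "sky", "field"],
--     "food": ["food", "meal", "dish", "drink", "coffee", "cake", "sushi", "cocktail"],
--     "fashion": ["dress", "suit", "outfit", "shoes", "jewelry", "handbag", "watch"],
--     "text": ["text", "typography", "lettering", "sign", "poster text", "quote"],
--     "group": ["group", "couple", "family", "crowd", "team"],
--     "abstract": ["abstract", "pattern", "geometric", "fractal", "texture"],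
-- }
--
-- MOOD_RULES = {
--     "dramatic": ["dramatic", "intense", "powerful", "bold", "striking", "epic"],
--     "peaceful": ["peaceful", "serene", "calm", "tranquil", "gentle", "quiet"],
--     "dark": ["dark", "moody", "gloomy", "noir", "shadowy", "mysterious"],
--     "bright": ["bright", "vibrant", "colorful", "cheerful", "sunny", "vivid"],
--     "nostalgic": ["nostalgic", "vintage", "retro", "old", "memory", "classic"],
--     "luxurious": ["luxury", "elegant", "premium", "high-end", "opulent", "sophisticated"],
--     "playful": ["playful", "fun", "whimsical", "cute", "quirky", "lighthearted"],
--     "eerie": ["eerie", "creepy", "haunting", "unsettling", "spooky", "horror"],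
--     "romantic": ["romantic", "love", "intimate", "tender", "passion", "warmth"],
--     "futuristic": ["futuristic", "sci-fi", "tech", "cyber", "neon", "holographic"],
-- }
--
-- def tag_prompt(prompt):
--     """Assign tags to a single prompt."""
--     text = f"{prompt.get('title', '')} {prompt.get('description', '')} {prompt.get('content', '')}".lower()
--
--     tags = {"styles": [], "use_cases": [], "subjects": [], "moods": []}
--
--     for tag, keywords in STYLE_RULES.items():
--         if any(kw in text for kw in keywords):
--             tags["styles"].append(tag)
--
--     for tag, keywords in USECASE_RULES.items():
--         if any(kw in text for kw in keywords):
--             tags["use_cases"].append(tag)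
--
--     for tag, keywords in SUBJECT_RULES.items():
--         if any(kw in text for kw in keywords):
--             tags["subjects"].append(tag)
--
--     for tag, keywords in MOOD_RULES.items():
--         if any(kw in text for kw in keywords):
--             tags["moods"].append(tag)
--
--     return tags
-- ===== SOURCE B (Python) =====
-- STYLE_RULES = {
--     "photography": ["photo", "photograph", "camera", "lens", "f/", "dslr", "shot on", "canon", "nikon", "fujifilm", "sony", "hasselblad"],
--     "cinematic": ["cinematic", "film still", "movie scene", "anamorphic", "widescreen", "film grain"],
--     "anime": ["anime", "manga", "japanese animation", "cel-shaded", "studio ghibli", "shonen", "shoujo"],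
--     "illustration": ["illustration", "illustrated", "digital art", "concept art", "hand-drawn", "digital painting"],
--     "3d-render": ["3d render", "3d model", "blender", "octane", "unreal engine", "c4d", "cinema 4d", "ray tracing"],
--     "pixel-art": ["pixel art", "pixelated", "8-bit", "16-bit", "retro game", "sprite"],
--     "watercolor": ["watercolor", "watercolour", "aquarelle", "wet media", "watercolor painting"],
--     "oil-painting": ["oil painting", "oil on canvas", "impasto", "brushstroke", "classical painting"],
--     "minimalist": ["minimalist", "minimal", "clean design", "simple", "negative space", "flat design"],
--     "cyberpunk": ["cyberpunk", "neon", "dystopian", "holographic", "futuristic city"],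
--     "retro": ["retro", "vintage", "nostalgia", "old-school", "analog", "70s", "80s", "90s"],
--     "sketch": ["sketch", "line art", "pencil", "charcoal", "drawing", "ink drawing"],
--     "isometric": ["isometric", "diorama", "tilt-shift", "miniature"],
--     "chibi": ["chibi", "kawaii", "q-style", "cute character", "super deformed"],
--     "surreal": ["surreal", "surrealism", "dreamlike", "impossible", "dali", "escher"],
--     "pop-art": ["pop art", "andy warhol", "comic book", "halftone", "bold colors"],
--     "gothic": ["gothic", "dark fantasy", "macabre", "dark aesthetic"],
--     "steampunk": ["steampunk", "clockwork", "victorian", "brass", "gears"],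
--     "vaporwave": ["vaporwave", "synthwave", "retrowave", "neon grid", "aesthetic"],
--     "art-nouveau": ["art nouveau", "art deco", "mucha", "ornamental"],
-- }
--
-- USECASE_RULES = {
--     "product-marketing": ["product", "commercial", "advertisement", "brand", "packaging", "marketing", "mockup"],
--     "social-media": ["social media", "instagram", "twitter", "tiktok", "post", "story", "feed", "reel"],
--     "youtube-thumbnail": ["youtube", "thumbnail", "video cover", "clickbait"],
--     "profile-avatar": ["profile", "avatar", "headshot", "pfp", "profile picture"],
--     "poster-flyer": ["poster", "flyer", "banner", "billboard", "signage", "placard"],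
--     "infographic": ["infographic", "diagram", "chart", "educational", "data viz", "flowchart", "timeline"],
--     "ecommerce": ["ecommerce", "e-commerce", "product listing", "shop", "store", "amazon", "listing"],
--     "game-asset": ["game", "game asset", "sprite", "character design", "weapon design", "rpg"],
--     "storyboard": ["storyboard", "comic", "panel", "sequence", "narrative", "comic strip"],
--     "app-design": ["app", "ui design", "ux", "interface", "web design", "wireframe", "dashboard"],
--     "logo": ["logo", "brand mark", "emblem", "icon design", "wordmark", "monogram"],
--     "fashion": ["fashion", "outfit", "clothing", "apparel", "runway", "editorial fashion"],
--     "food": ["food", "drink", "beverage", "recipe", "culinary", "restaurant", "cafe"],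
--     "architecture": ["architecture", "interior", "building", "room design", "house", "office space"],
--     "landscape": ["landscape", "nature", "scenery", "mountain", "ocean", "forest", "sunset"],
--     "typography": ["typography", "text design", "lettering", "font", "calligraphy", "type"],
--     "quote-card": ["quote", "motivational", "inspirational", "verse", "saying"],
--     "meme": ["meme", "funny", "humor", "reaction", "viral"],
--     "wallpaper": ["wallpaper", "desktop", "phone wallpaper", "background"],
-- }
--
-- SUBJECT_RULES = {
--     "portrait": ["portrait", "face", "headshot", "selfie", "close-up face"],
--     "character": ["character", "oc", "original character", "fictional", "fantasy character"],
--     "product": ["product", "item", "object", "device", "gadget", "bottle", "jar", "package"],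
--     "animal": ["animal", "creature", "pet", "dog", "cat", "bird", "wildlife", "dragon"],
--     "vehicle": ["vehicle", "car", "motorcycle", "spaceship", "aircraft", "boat", "truck"],
--     "architecture": ["building", "house", "interior", "room", "skyscraper", "castle", "temple"],
--     "landscape": ["landscape", "mountain", "ocean", "forest", "desert", "sky", "field"],
--     "food": ["food", "meal", "dish", "drink", "coffee", "cake", "sushi", "cocktail"],
--     "fashion": ["dress", "suit", "outfit", "shoes", "jewelry", "handbag", "watch"],
--     "text": ["text", "typography", "lettering", "sign", "poster text", "quote"],
--     "group": ["group", "couple", "family", "crowd", "team"],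
--     "abstract": ["abstract", "pattern", "geometric", "fractal", "texture"],
-- }
--
-- MOOD_RULES = {
--     "dramatic": ["dramatic", "intense", "powerful", "bold", "striking", "epic"],
--     "peaceful": ["peaceful", "serene", "calm", "tranquil", "gentle", "quiet"],
--     "dark": ["dark", "moody", "gloomy", "noir", "shadowy", "mysterious"],
--     "bright": ["bright", "vibrant", "colorful", "cheerful", "sunny", "vivid"],
--     "nostalgic": ["nostalgic", "vintage", "retro", "old", "memory", "classic"],
--     "luxurious": ["luxury", "elegant", "premium", "high-end", "opulent", "sophisticated"],
--     "playful": ["playful", "fun", "whimsical", "cute", "quirky", "lighthearted"],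
--     "eerie": ["eerie", "creepy", "haunting", "unsettling", "spooky", "horror"],
--     "romantic": ["romantic", "love", "intimate", "tender", "passion", "warmth"],
--     "futuristic": ["futuristic", "sci-fi", "tech", "cyber", "neon", "holographic"],
-- }
--
--
-- _CATEGORIES = [
--     ("styles", STYLE_RULES),
--     ("use_cases", USECASE_RULES),
--     ("subjects", SUBJECT_RULES),
--     ("moods", MOOD_RULES),
-- ]
--
-- # flattened inverted index: one (keyword, category, tag) triple per rule keyword,
-- # in category order then rule order
-- _INDEX = [(kw, name, tag)
--           for name, rules in _CATEGORIES
--           for tag, kws in rules.items()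
--           for kw in kws]
--
--
-- def tag_prompt(prompt):
--     """Assign tags to a single prompt."""
--     text = " ".join((prompt.get("title", ""),
--                      prompt.get("description", ""),
--                      prompt.get("content", ""))).lower()
--     tags = {"styles": [], "use_cases": [], "subjects": [], "moods": []}
--     for kw, cat, tag in _INDEX:
--         if kw in text:
--             bucket = tags[cat]
--             if tag not in bucket:
--                 bucket.append(tag)
--     return tags
-- ===== Notes on version B (the rewrite author's own statement) =====
-- stated objective: alternative
-- what changed: A runs four per-category loops testing every keyword of every tag against the text; B precomputes one flattened (keyword, category, tag) inverted index at module load and makes a single pass over it, order-preserving-deduplicating matched tags into per-category buckets.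
import Mathlib
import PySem

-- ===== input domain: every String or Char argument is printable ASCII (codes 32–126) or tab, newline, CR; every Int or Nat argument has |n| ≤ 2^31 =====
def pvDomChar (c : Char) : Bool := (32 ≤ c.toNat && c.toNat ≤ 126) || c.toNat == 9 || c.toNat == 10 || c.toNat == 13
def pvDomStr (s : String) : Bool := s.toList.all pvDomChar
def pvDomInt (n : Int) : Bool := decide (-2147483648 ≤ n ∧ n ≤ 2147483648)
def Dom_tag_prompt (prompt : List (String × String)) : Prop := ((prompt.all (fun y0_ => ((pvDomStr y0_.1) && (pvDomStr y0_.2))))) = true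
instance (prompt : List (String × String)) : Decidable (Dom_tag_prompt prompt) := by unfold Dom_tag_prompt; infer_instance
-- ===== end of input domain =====

-- ===== PORT A =====
-- B replaces A's four per-category rule-table loops (each testing every keyword of every tag
-- against the text) by a single pass over one flattened (keyword, category, tag) inverted index
-- with order-preserving dedup into per-category buckets (alternative algorithm, same result).
def styleRules : List (String × List String) := [
  ("photography", ["photo", "photograph", "camera", "lens", "f/", "dslr", "shot on", "canon", "nikon", "fujifilm", "sony", "hasselblad"]),
  ("cinematic", ["cinematic", "film still", "movie scene", "anamorphic", "widescreen", "film grain"]),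
  ("anime", ["anime", "manga", "japanese animation", "cel-shaded", "studio ghibli", "shonen", "shoujo"]),
  ("illustration", ["illustration", "illustrated", "digital art", "concept art", "hand-drawn", "digital painting"]),
  ("3d-render", ["3d render", "3d model", "blender", "octane", "unreal engine", "c4d", "cinema 4d", "ray tracing"]),
  ("pixel-art", ["pixel art", "pixelated", "8-bit", "16-bit", "retro game", "sprite"]),
  ("watercolor", ["watercolor", "watercolour", "aquarelle", "wet media", "watercolor painting"]),
  ("oil-painting", ["oil painting", "oil on canvas", "impasto", "brushstroke", "classical painting"]),
  ("minimalist", ["minimalist", "minimal", "clean design", "simple", "negative space", "flat design"]),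
  ("cyberpunk", ["cyberpunk", "neon", "dystopian", "holographic", "futuristic city"]),
  ("retro", ["retro", "vintage", "nostalgia", "old-school", "analog", "70s", "80s", "90s"]),
  ("sketch", ["sketch", "line art", "pencil", "charcoal", "drawing", "ink drawing"]),
  ("isometric", ["isometric", "diorama", "tilt-shift", "miniature"]),
  ("chibi", ["chibi", "kawaii", "q-style", "cute character", "super deformed"]),
  ("surreal", ["surreal", "surrealism", "dreamlike", "impossible", "dali", "escher"]),
  ("pop-art", ["pop art", "andy warhol", "comic book", "halftone", "bold colors"]),
  ("gothic", ["gothic", "dark fantasy", "macabre", "dark aesthetic"]),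
  ("steampunk", ["steampunk", "clockwork", "victorian", "brass", "gears"]),
  ("vaporwave", ["vaporwave", "synthwave", "retrowave", "neon grid", "aesthetic"]),
  ("art-nouveau", ["art nouveau", "art deco", "mucha", "ornamental"])]
def usecaseRules : List (String × List String) := [
  ("product-marketing", ["product", "commercial", "advertisement", "brand", "packaging", "marketing", "mockup"]),
  ("social-media", ["social media", "instagram", "twitter", "tiktok", "post", "story", "feed", "reel"]),
  ("youtube-thumbnail", ["youtube", "thumbnail", "video cover", "clickbait"]),
  ("profile-avatar", ["profile", "avatar", "headshot", "pfp", "profile picture"]),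
  ("poster-flyer", ["poster", "flyer", "banner", "billboard", "signage", "placard"]),
  ("infographic", ["infographic", "diagram", "chart", "educational", "data viz", "flowchart", "timeline"]),
  ("ecommerce", ["ecommerce", "e-commerce", "product listing", "shop", "store", "amazon", "listing"]),
  ("game-asset", ["game", "game asset", "sprite", "character design", "weapon design", "rpg"]),
  ("storyboard", ["storyboard", "comic", "panel", "sequence", "narrative", "comic strip"]),
  ("app-design", ["app", "ui design", "ux", "interface", "web design", "wireframe", "dashboard"]),
  ("logo", ["logo", "brand mark", "emblem", "icon design", "wordmark", "monogram"]),
  ("fashion", ["fashion", "outfit", "clothing", "apparel", "runway", "editorial fashion"]),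
  ("food", ["food", "drink", "beverage", "recipe", "culinary", "restaurant", "cafe"]),
  ("architecture", ["architecture", "interior", "building", "room design", "house", "office space"]),
  ("landscape", ["landscape", "nature", "scenery", "mountain", "ocean", "forest", "sunset"]),
  ("typography", ["typography", "text design", "lettering", "font", "calligraphy", "type"]),
  ("quote-card", ["quote", "motivational", "inspirational", "verse", "saying"]),
  ("meme", ["meme", "funny", "humor", "reaction", "viral"]),
  ("wallpaper", ["wallpaper", "desktop", "phone wallpaper", "background"])]
def subjectRules : List (String × List String) := [
  ("portrait", ["portrait", "face", "headshot", "selfie", "close-up face"]),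
  ("character", ["character", "oc", "original character", "fictional", "fantasy character"]),
  ("product", ["product", "item", "object", "device", "gadget", "bottle", "jar", "package"]),
  ("animal", ["animal", "creature", "pet", "dog", "cat", "bird", "wildlife", "dragon"]),
  ("vehicle", ["vehicle", "car", "motorcycle", "spaceship", "aircraft", "boat", "truck"]),
  ("architecture", ["building", "house", "interior", "room", "skyscraper", "castle", "temple"]),
  ("landscape", ["landscape", "mountain", "ocean", "forest", "desert", "sky", "field"]),
  ("food", ["food", "meal", "dish", "drink", "coffee", "cake", "sushi", "cocktail"]),
  ("fashion", ["dress", "suit", "outfit", "shoes", "jewelry", "handbag", "watch"]),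
  ("text", ["text", "typography", "lettering", "sign", "poster text", "quote"]),
  ("group", ["group", "couple", "family", "crowd", "team"]),
  ("abstract", ["abstract", "pattern", "geometric", "fractal", "texture"])]
def moodRules : List (String × List String) := [
  ("dramatic", ["dramatic", "intense", "powerful", "bold", "striking", "epic"]),
  ("peaceful", ["peaceful", "serene", "calm", "tranquil", "gentle", "quiet"]),
  ("dark", ["dark", "moody", "gloomy", "noir", "shadowy", "mysterious"]),
  ("bright", ["bright", "vibrant", "colorful", "cheerful", "sunny", "vivid"]),
  ("nostalgic", ["nostalgic", "vintage", "retro", "old", "memory", "classic"]),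
  ("luxurious", ["luxury", "elegant", "premium", "high-end", "opulent", "sophisticated"]),
  ("playful", ["playful", "fun", "whimsical", "cute", "quirky", "lighthearted"]),
  ("eerie", ["eerie", "creepy", "haunting", "unsettling", "spooky", "horror"]),
  ("romantic", ["romantic", "love", "intimate", "tender", "passion", "warmth"]),
  ("futuristic", ["futuristic", "sci-fi", "tech", "cyber", "neon", "holographic"])]

-- A's per-category loop: 'if any(kw in text for kw in keywords): tags[cat].append(tag)'
def matchTags (text : String) (rules : List (String × List String)) : List String :=
  rules.foldl (fun acc r => if r.2.any (fun kw => PySem.Str.isIn kw text) then acc ++ [r.1] else acc) []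

def tag_prompt (prompt : List (String × String)) : List (String × List String) :=
  let d : PySem.Dict String String := PySem.Dict.mk prompt
  let text := PySem.Str.lower (PySem.Str.join " " [d.getD "title" "", d.getD "description" "", d.getD "content" ""])
  [("styles", matchTags text styleRules),
   ("use_cases", matchTags text usecaseRules),
   ("subjects", matchTags text subjectRules),
   ("moods", matchTags text moodRules)]

-- ===== PORT B =====
-- Source B's module-level _INDEX constant, written out evaluated: one (keyword, category, tag)
-- triple per rule keyword, category order then rule order (lemma indexB_eq below
-- re-checks it against the rule tables).
def indexB : List (String × String × String) := [
  ("photo", "styles", "photography"),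
  ("photograph", "styles", "photography"),
  ("camera", "styles", "photography"),
  ("lens", "styles", "photography"),
  ("f/", "styles", "photography"),
  ("dslr", "styles", "photography"),
  ("shot on", "styles", "photography"),
  ("canon", "styles", "photography"),
  ("nikon", "styles", "photography"),
  ("fujifilm", "styles", "photography"),
  ("sony", "styles", "photography"),
  ("hasselblad", "styles", "photography"),
  ("cinematic", "styles", "cinematic"),
  ("film still", "styles", "cinematic"),
  ("movie scene", "styles", "cinematic"),
  ("anamorphic", "styles", "cinematic"),
  ("widescreen", "styles", "cinematic"),
  ("film grain", "styles", "cinematic"),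
  ("anime", "styles", "anime"),
  ("manga", "styles", "anime"),
  ("japanese animation", "styles", "anime"),
  ("cel-shaded", "styles", "anime"),
  ("studio ghibli", "styles", "anime"),
  ("shonen", "styles", "anime"),
  ("shoujo", "styles", "anime"),
  ("illustration", "styles", "illustration"),
  ("illustrated", "styles", "illustration"),
  ("digital art", "styles", "illustration"),
  ("concept art", "styles", "illustration"),
  ("hand-drawn", "styles", "illustration"),
  ("digital painting", "styles", "illustration"),
  ("3d render", "styles", "3d-render"),
  ("3d model", "styles", "3d-render"),
  ("blender", "styles", "3d-render"),
  ("octane", "styles", "3d-render"),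
  ("unreal engine", "styles", "3d-render"),
  ("c4d", "styles", "3d-render"),
  ("cinema 4d", "styles", "3d-render"),
  ("ray tracing", "styles", "3d-render"),
  ("pixel art", "styles", "pixel-art"),
  ("pixelated", "styles", "pixel-art"),
  ("8-bit", "styles", "pixel-art"),
  ("16-bit", "styles", "pixel-art"),
  ("retro game", "styles", "pixel-art"),
  ("sprite", "styles", "pixel-art"),
  ("watercolor", "styles", "watercolor"),
  ("watercolour", "styles", "watercolor"),
  ("aquarelle", "styles", "watercolor"),
  ("wet media", "styles", "watercolor"),
  ("watercolor painting", "styles", "watercolor"),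
  ("oil painting", "styles", "oil-painting"),
  ("oil on canvas", "styles", "oil-painting"),
  ("impasto", "styles", "oil-painting"),
  ("brushstroke", "styles", "oil-painting"),
  ("classical painting", "styles", "oil-painting"),
  ("minimalist", "styles", "minimalist"),
  ("minimal", "styles", "minimalist"),
  ("clean design", "styles", "minimalist"),
  ("simple", "styles", "minimalist"),
  ("negative space", "styles", "minimalist"),
  ("flat design", "styles", "minimalist"),
  ("cyberpunk", "styles", "cyberpunk"),
  ("neon", "styles", "cyberpunk"),
  ("dystopian", "styles", "cyberpunk"),
  ("holographic", "styles", "cyberpunk"),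
  ("futuristic city", "styles", "cyberpunk"),
  ("retro", "styles", "retro"),
  ("vintage", "styles", "retro"),
  ("nostalgia", "styles", "retro"),
  ("old-school", "styles", "retro"),
  ("analog", "styles", "retro"),
  ("70s", "styles", "retro"),
  ("80s", "styles", "retro"),
  ("90s", "styles", "retro"),
  ("sketch", "styles", "sketch"),
  ("line art", "styles", "sketch"),
  ("pencil", "styles", "sketch"),
  ("charcoal", "styles", "sketch"),
  ("drawing", "styles", "sketch"),
  ("ink drawing", "styles", "sketch"),
  ("isometric", "styles", "isometric"),
  ("diorama", "styles", "isometric"),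
  ("tilt-shift", "styles", "isometric"),
  ("miniature", "styles", "isometric"),
  ("chibi", "styles", "chibi"),
  ("kawaii", "styles", "chibi"),
  ("q-style", "styles", "chibi"),
  ("cute character", "styles", "chibi"),
  ("super deformed", "styles", "chibi"),
  ("surreal", "styles", "surreal"),
  ("surrealism", "styles", "surreal"),
  ("dreamlike", "styles", "surreal"),
  ("impossible", "styles", "surreal"),
  ("dali", "styles", "surreal"),
  ("escher", "styles", "surreal"),
  ("pop art", "styles", "pop-art"),
  ("andy warhol", "styles", "pop-art"),
  ("comic book", "styles", "pop-art"),
  ("halftone", "styles", "pop-art"),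
  ("bold colors", "styles", "pop-art"),
  ("gothic", "styles", "gothic"),
  ("dark fantasy", "styles", "gothic"),
  ("macabre", "styles", "gothic"),
  ("dark aesthetic", "styles", "gothic"),
  ("steampunk", "styles", "steampunk"),
  ("clockwork", "styles", "steampunk"),
  ("victorian", "styles", "steampunk"),
  ("brass", "styles", "steampunk"),
  ("gears", "styles", "steampunk"),
  ("vaporwave", "styles", "vaporwave"),
  ("synthwave", "styles", "vaporwave"),
  ("retrowave", "styles", "vaporwave"),
  ("neon grid", "styles", "vaporwave"),
  ("aesthetic", "styles", "vaporwave"),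
  ("art nouveau", "styles", "art-nouveau"),
  ("art deco", "styles", "art-nouveau"),
  ("mucha", "styles", "art-nouveau"),
  ("ornamental", "styles", "art-nouveau"),
  ("product", "use_cases", "product-marketing"),
  ("commercial", "use_cases", "product-marketing"),
  ("advertisement", "use_cases", "product-marketing"),
  ("brand", "use_cases", "product-marketing"),
  ("packaging", "use_cases", "product-marketing"),
  ("marketing", "use_cases", "product-marketing"),
  ("mockup", "use_cases", "product-marketing"),
  ("social media", "use_cases", "social-media"),
  ("instagram", "use_cases", "social-media"),
  ("twitter", "use_cases", "social-media"),
  ("tiktok", "use_cases", "social-media"),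
  ("post", "use_cases", "social-media"),
  ("story", "use_cases", "social-media"),
  ("feed", "use_cases", "social-media"),
  ("reel", "use_cases", "social-media"),
  ("youtube", "use_cases", "youtube-thumbnail"),
  ("thumbnail", "use_cases", "youtube-thumbnail"),
  ("video cover", "use_cases", "youtube-thumbnail"),
  ("clickbait", "use_cases", "youtube-thumbnail"),
  ("profile", "use_cases", "profile-avatar"),
  ("avatar", "use_cases", "profile-avatar"),
  ("headshot", "use_cases", "profile-avatar"),
  ("pfp", "use_cases", "profile-avatar"),
  ("profile picture", "use_cases", "profile-avatar"),
  ("poster", "use_cases", "poster-flyer"),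
  ("flyer", "use_cases", "poster-flyer"),
  ("banner", "use_cases", "poster-flyer"),
  ("billboard", "use_cases", "poster-flyer"),
  ("signage", "use_cases", "poster-flyer"),
  ("placard", "use_cases", "poster-flyer"),
  ("infographic", "use_cases", "infographic"),
  ("diagram", "use_cases", "infographic"),
  ("chart", "use_cases", "infographic"),
  ("educational", "use_cases", "infographic"),
  ("data viz", "use_cases", "infographic"),
  ("flowchart", "use_cases", "infographic"),
  ("timeline", "use_cases", "infographic"),
  ("ecommerce", "use_cases", "ecommerce"),
  ("e-commerce", "use_cases", "ecommerce"),
  ("product listing", "use_cases", "ecommerce"),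
  ("shop", "use_cases", "ecommerce"),
  ("store", "use_cases", "ecommerce"),
  ("amazon", "use_cases", "ecommerce"),
  ("listing", "use_cases", "ecommerce"),
  ("game", "use_cases", "game-asset"),
  ("game asset", "use_cases", "game-asset"),
  ("sprite", "use_cases", "game-asset"),
  ("character design", "use_cases", "game-asset"),
  ("weapon design", "use_cases", "game-asset"),
  ("rpg", "use_cases", "game-asset"),
  ("storyboard", "use_cases", "storyboard"),
  ("comic", "use_cases", "storyboard"),
  ("panel", "use_cases", "storyboard"),
  ("sequence", "use_cases", "storyboard"),
  ("narrative", "use_cases", "storyboard"),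
  ("comic strip", "use_cases", "storyboard"),
  ("app", "use_cases", "app-design"),
  ("ui design", "use_cases", "app-design"),
  ("ux", "use_cases", "app-design"),
  ("interface", "use_cases", "app-design"),
  ("web design", "use_cases", "app-design"),
  ("wireframe", "use_cases", "app-design"),
  ("dashboard", "use_cases", "app-design"),
  ("logo", "use_cases", "logo"),
  ("brand mark", "use_cases", "logo"),
  ("emblem", "use_cases", "logo"),
  ("icon design", "use_cases", "logo"),
  ("wordmark", "use_cases", "logo"),
  ("monogram", "use_cases", "logo"),
  ("fashion", "use_cases", "fashion"),
  ("outfit", "use_cases", "fashion"),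
  ("clothing", "use_cases", "fashion"),
  ("apparel", "use_cases", "fashion"),
  ("runway", "use_cases", "fashion"),
  ("editorial fashion", "use_cases", "fashion"),
  ("food", "use_cases", "food"),
  ("drink", "use_cases", "food"),
  ("beverage", "use_cases", "food"),
  ("recipe", "use_cases", "food"),
  ("culinary", "use_cases", "food"),
  ("restaurant", "use_cases", "food"),
  ("cafe", "use_cases", "food"),
  ("architecture", "use_cases", "architecture"),
  ("interior", "use_cases", "architecture"),
  ("building", "use_cases", "architecture"),
  ("room design", "use_cases", "architecture"),
  ("house", "use_cases", "architecture"),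
  ("office space", "use_cases", "architecture"),
  ("landscape", "use_cases", "landscape"),
  ("nature", "use_cases", "landscape"),
  ("scenery", "use_cases", "landscape"),
  ("mountain", "use_cases", "landscape"),
  ("ocean", "use_cases", "landscape"),
  ("forest", "use_cases", "landscape"),
  ("sunset", "use_cases", "landscape"),
  ("typography", "use_cases", "typography"),
  ("text design", "use_cases", "typography"),
  ("lettering", "use_cases", "typography"),
  ("font", "use_cases", "typography"),
  ("calligraphy", "use_cases", "typography"),
  ("type", "use_cases", "typography"),
  ("quote", "use_cases", "quote-card"),
  ("motivational", "use_cases", "quote-card"),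
  ("inspirational", "use_cases", "quote-card"),
  ("verse", "use_cases", "quote-card"),
  ("saying", "use_cases", "quote-card"),
  ("meme", "use_cases", "meme"),
  ("funny", "use_cases", "meme"),
  ("humor", "use_cases", "meme"),
  ("reaction", "use_cases", "meme"),
  ("viral", "use_cases", "meme"),
  ("wallpaper", "use_cases", "wallpaper"),
  ("desktop", "use_cases", "wallpaper"),
  ("phone wallpaper", "use_cases", "wallpaper"),
  ("background", "use_cases", "wallpaper"),
  ("portrait", "subjects", "portrait"),
  ("face", "subjects", "portrait"),
  ("headshot", "subjects", "portrait"),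
  ("selfie", "subjects", "portrait"),
  ("close-up face", "subjects", "portrait"),
  ("character", "subjects", "character"),
  ("oc", "subjects", "character"),
  ("original character", "subjects", "character"),
  ("fictional", "subjects", "character"),
  ("fantasy character", "subjects", "character"),
  ("product", "subjects", "product"),
  ("item", "subjects", "product"),
  ("object", "subjects", "product"),
  ("device", "subjects", "product"),
  ("gadget", "subjects", "product"),
  ("bottle", "subjects", "product"),
  ("jar", "subjects", "product"),
  ("package", "subjects", "product"),
  ("animal", "subjects", "animal"),
  ("creature", "subjects", "animal"),
  ("pet", "subjects", "animal"),
  ("dog", "subjects", "animal"),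
  ("cat", "subjects", "animal"),
  ("bird", "subjects", "animal"),
  ("wildlife", "subjects", "animal"),
  ("dragon", "subjects", "animal"),
  ("vehicle", "subjects", "vehicle"),
  ("car", "subjects", "vehicle"),
  ("motorcycle", "subjects", "vehicle"),
  ("spaceship", "subjects", "vehicle"),
  ("aircraft", "subjects", "vehicle"),
  ("boat", "subjects", "vehicle"),
  ("truck", "subjects", "vehicle"),
  ("building", "subjects", "architecture"),
  ("house", "subjects", "architecture"),
  ("interior", "subjects", "architecture"),
  ("room", "subjects", "architecture"),
  ("skyscraper", "subjects", "architecture"),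
  ("castle", "subjects", "architecture"),
  ("temple", "subjects", "architecture"),
  ("landscape", "subjects", "landscape"),
  ("mountain", "subjects", "landscape"),
  ("ocean", "subjects", "landscape"),
  ("forest", "subjects", "landscape"),
  ("desert", "subjects", "landscape"),
  ("sky", "subjects", "landscape"),
  ("field", "subjects", "landscape"),
  ("food", "subjects", "food"),
  ("meal", "subjects", "food"),
  ("dish", "subjects", "food"),
  ("drink", "subjects", "food"),
  ("coffee", "subjects", "food"),
  ("cake", "subjects", "food"),
  ("sushi", "subjects", "food"),
  ("cocktail", "subjects", "food"),
  ("dress", "subjects", "fashion"),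
  ("suit", "subjects", "fashion"),
  ("outfit", "subjects", "fashion"),
  ("shoes", "subjects", "fashion"),
  ("jewelry", "subjects", "fashion"),
  ("handbag", "subjects", "fashion"),
  ("watch", "subjects", "fashion"),
  ("text", "subjects", "text"),
  ("typography", "subjects", "text"),
  ("lettering", "subjects", "text"),
  ("sign", "subjects", "text"),
  ("poster text", "subjects", "text"),
  ("quote", "subjects", "text"),
  ("group", "subjects", "group"),
  ("couple", "subjects", "group"),
  ("family", "subjects", "group"),
  ("crowd", "subjects", "group"),
  ("team", "subjects", "group"),
  ("abstract", "subjects", "abstract"),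
  ("pattern", "subjects", "abstract"),
  ("geometric", "subjects", "abstract"),
  ("fractal", "subjects", "abstract"),
  ("texture", "subjects", "abstract"),
  ("dramatic", "moods", "dramatic"),
  ("intense", "moods", "dramatic"),
  ("powerful", "moods", "dramatic"),
  ("bold", "moods", "dramatic"),
  ("striking", "moods", "dramatic"),
  ("epic", "moods", "dramatic"),
  ("peaceful", "moods", "peaceful"),
  ("serene", "moods", "peaceful"),
  ("calm", "moods", "peaceful"),
  ("tranquil", "moods", "peaceful"),
  ("gentle", "moods", "peaceful"),
  ("quiet", "moods", "peaceful"),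
  ("dark", "moods", "dark"),
  ("moody", "moods", "dark"),
  ("gloomy", "moods", "dark"),
  ("noir", "moods", "dark"),
  ("shadowy", "moods", "dark"),
  ("mysterious", "moods", "dark"),
  ("bright", "moods", "bright"),
  ("vibrant", "moods", "bright"),
  ("colorful", "moods", "bright"),
  ("cheerful", "moods", "bright"),
  ("sunny", "moods", "bright"),
  ("vivid", "moods", "bright"),
  ("nostalgic", "moods", "nostalgic"),
  ("vintage", "moods", "nostalgic"),
  ("retro", "moods", "nostalgic"),
  ("old", "moods", "nostalgic"),
  ("memory", "moods", "nostalgic"),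
  ("classic", "moods", "nostalgic"),
  ("luxury", "moods", "luxurious"),
  ("elegant", "moods", "luxurious"),
  ("premium", "moods", "luxurious"),
  ("high-end", "moods", "luxurious"),
  ("opulent", "moods", "luxurious"),
  ("sophisticated", "moods", "luxurious"),
  ("playful", "moods", "playful"),
  ("fun", "moods", "playful"),
  ("whimsical", "moods", "playful"),
  ("cute", "moods", "playful"),
  ("quirky", "moods", "playful"),
  ("lighthearted", "moods", "playful"),
  ("eerie", "moods", "eerie"),
  ("creepy", "moods", "eerie"),
  ("haunting", "moods", "eerie"),
  ("unsettling", "moods", "eerie"),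
  ("spooky", "moods", "eerie"),
  ("horror", "moods", "eerie"),
  ("romantic", "moods", "romantic"),
  ("love", "moods", "romantic"),
  ("intimate", "moods", "romantic"),
  ("tender", "moods", "romantic"),
  ("passion", "moods", "romantic"),
  ("warmth", "moods", "romantic"),
  ("futuristic", "moods", "futuristic"),
  ("sci-fi", "moods", "futuristic"),
  ("tech", "moods", "futuristic"),
  ("cyber", "moods", "futuristic"),
  ("neon", "moods", "futuristic"),
  ("holographic", "moods", "futuristic")]

-- 'if tag not in bucket: bucket.append(tag)'
def bucketAdd (b : List String) (tag : String) : List String :=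
  if tag ∈ b then b else b ++ [tag]

-- the body of Source B's single loop over _INDEX
def indexStep (text : String) (tags : PySem.Dict String (List String)) (t : String × String × String) :
    PySem.Dict String (List String) :=
  if PySem.Str.isIn t.1 text then tags.modify t.2.1 [] (fun b => bucketAdd b t.2.2) else tags

-- 'tags = {"styles": [], "use_cases": [], "subjects": [], "moods": []}'
def initTags : PySem.Dict String (List String) :=
  PySem.Dict.ofList [("styles", []), ("use_cases", []), ("subjects", []), ("moods", [])]

def tag_prompt_alt (prompt : List (String × String)) : List (String × List String) :=
  let d : PySem.Dict String String := PySem.Dict.mk prompt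
  let text := PySem.Str.lower (PySem.Str.join " " [d.getD "title" "", d.getD "description" "", d.getD "content" ""])
  let tags : PySem.Dict String (List String) := indexB.foldl (indexStep text) initTags
  tags.items

-- ===== PRECONDITION & SPEC =====
def Spec_tag_prompt (prompt : List (String × String)) (out : List (String × List String)) : Prop := out = tag_prompt_alt prompt
instance (prompt : List (String × String)) (out : List (String × List String)) : Decidable (Spec_tag_prompt prompt out) := by unfold Spec_tag_prompt; infer_instance

-- ===== CLAIM (what is proved, stated in full; the proofs are below) =====
def Claim_equal_tag_prompt : Prop := ∀ (prompt : List (String × String)), Dom_tag_prompt prompt → Spec_tag_prompt prompt (tag_prompt prompt)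

-- ===== LEMMAS AND PROOFS =====

-- the flattened form of one category's table
def flatCat (c : String) (rules : List (String × List String)) : List (String × String × String) :=
  rules.flatMap (fun r => r.2.map (fun kw => (kw, c, r.1)))

-- the literal index is the concatenation of the four flattened tables
set_option maxRecDepth 40000 in
lemma indexB_eq : indexB
    = flatCat "styles" styleRules ++ flatCat "use_cases" usecaseRules
      ++ flatCat "subjects" subjectRules ++ flatCat "moods" moodRules := by rfl

lemma flatCat_cats (c : String) (rules : List (String × List String)) :
    ∀ t ∈ flatCat c rules, t.2.1 = c := by
  intro t ht
  simp only [flatCat, List.mem_flatMap, List.mem_map] at ht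
  rcases ht with ⟨r, _, kw, _, rfl⟩
  rfl

-- the fold over the index never changes the key set (every category key is already present)
lemma keys_foldl_indexStep (text : String) (l : List (String × String × String))
    (d : PySem.Dict String (List String)) (h : ∀ t ∈ l, d.contains t.2.1 = true) :
    (l.foldl (indexStep text) d).keys = d.keys := by
  induction l generalizing d with
  | nil => rfl
  | cons t l ih =>
    simp only [List.foldl_cons]
    have hstep : (indexStep text d t).keys = d.keys := by
      unfold indexStep
      split
      · rw [PySem.Dict.keys_modify]
        exact PySem.Dict.keys_insert_of_contains _ _ (h t (by simp))
      · rfl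
    have hc : ∀ t' ∈ l, (indexStep text d t).contains t'.2.1 = true := by
      intro t' ht'
      have hm := h t' (by simp [ht'])
      unfold indexStep
      split
      · rw [PySem.Dict.contains_modify]; simp [hm]
      · exact hm
    rw [ih (indexStep text d t) hc, hstep]

-- reading one bucket out of the dict fold = a fold on that bucket over the triples keyed to it
lemma getD_foldl_indexStep (text k : String) (l : List (String × String × String))
    (d : PySem.Dict String (List String)) :
    (l.foldl (indexStep text) d).getD k []
      = l.foldl (fun b t => if t.2.1 = k then (if PySem.Str.isIn t.1 text then bucketAdd b t.2.2 else b) else b)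
          (d.getD k []) := by
  induction l generalizing d with
  | nil => rfl
  | cons t l ih =>
    simp only [List.foldl_cons]
    rw [ih]
    congr 1
    unfold indexStep
    split_ifs with hp hk hk
    · rw [hk, PySem.Dict.getD_modify_self]
    · rw [PySem.Dict.getD_modify, if_neg (Ne.symm hk)]
    · rfl
    · rfl

-- triples of another category leave the bucket alone
lemma chunk_other (text k c : String) (hkc : c ≠ k) (l : List (String × String × String))
    (h : ∀ t ∈ l, t.2.1 = c) (b : List String) :
    l.foldl (fun b t => if t.2.1 = k then (if PySem.Str.isIn t.1 text then bucketAdd b t.2.2 else b) else b) b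
      = b := by
  induction l generalizing b with
  | nil => rfl
  | cons t l ih =>
    simp only [List.foldl_cons]
    rw [if_neg (by rw [h t (by simp)]; exact hkc), ih (fun t' ht' => h t' (by simp [ht']))]

-- on this category's own triples the key test always succeeds
lemma chunk_same (text k : String) (l : List (String × String × String))
    (h : ∀ t ∈ l, t.2.1 = k) (b : List String) :
    l.foldl (fun b t => if t.2.1 = k then (if PySem.Str.isIn t.1 text then bucketAdd b t.2.2 else b) else b) b
      = l.foldl (fun b t => if PySem.Str.isIn t.1 text then bucketAdd b t.2.2 else b) b := by
  induction l generalizing b with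
  | nil => rfl
  | cons t l ih =>
    simp only [List.foldl_cons]
    rw [if_pos (h t (by simp)), ih (fun t' ht' => h t' (by simp [ht']))]

-- a run of triples that all carry a tag already in the bucket changes nothing
lemma kw_fold_mem (text c tag : String) (kws : List String) (b : List String) (hb : tag ∈ b) :
    (kws.map (fun kw => (kw, c, tag))).foldl
      (fun b t => if PySem.Str.isIn t.1 text then bucketAdd b t.2.2 else b) b = b := by
  induction kws with
  | nil => rfl
  | cons kw kws ih =>
    simp only [List.map_cons, List.foldl_cons]
    have hstep : (if PySem.Str.isIn kw text then bucketAdd b tag else b) = b := by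
      unfold bucketAdd; simp [hb]
    rw [hstep, ih]

-- one tag's run of triples appends the tag iff one of its keywords matches
lemma kw_fold (text c tag : String) (kws : List String) (b : List String) (hb : tag ∉ b) :
    (kws.map (fun kw => (kw, c, tag))).foldl
      (fun b t => if PySem.Str.isIn t.1 text then bucketAdd b t.2.2 else b) b
      = if kws.any (fun kw => PySem.Str.isIn kw text) then b ++ [tag] else b := by
  induction kws with
  | nil => simp
  | cons kw kws ih =>
    simp only [List.map_cons, List.foldl_cons, List.any_cons]
    by_cases hp : PySem.Str.isIn kw text
    · have hbA : bucketAdd b tag = b ++ [tag] := by unfold bucketAdd; simp [hb]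
      have hp' : PySem.Chars.isIn kw.toList text.toList = true := by simpa using hp
      rw [if_pos hp, hbA, kw_fold_mem text c tag kws _ (by simp)]
      simp [hp']
    · have hp' : PySem.Chars.isIn kw.toList text.toList = false := by simpa using hp
      rw [if_neg hp, ih]
      simp [hp']

-- the whole flattened category chunk = A's per-rule append loop
lemma flat_fold (text c : String) (rules : List (String × List String)) (b : List String)
    (hnd : (rules.map Prod.fst).Nodup) (hb : ∀ r ∈ rules, r.1 ∉ b) :
    (flatCat c rules).foldl
      (fun b t => if PySem.Str.isIn t.1 text then bucketAdd b t.2.2 else b) b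
      = rules.foldl (fun acc r => if r.2.any (fun kw => PySem.Str.isIn kw text) then acc ++ [r.1] else acc) b := by
  induction rules generalizing b with
  | nil => rfl
  | cons r rules ih =>
    simp only [flatCat, List.flatMap_cons, List.foldl_append, List.foldl_cons]
    rw [kw_fold text c r.1 r.2 b (hb r (by simp))]
    simp only [List.map_cons, List.nodup_cons] at hnd
    by_cases hany : r.2.any (fun kw => PySem.Str.isIn kw text)
    · rw [if_pos hany,
          show (rules.flatMap fun r => r.2.map fun kw => (kw, c, r.1)) = flatCat c rules from rfl]
      refine ih (b ++ [r.1]) hnd.2 ?_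
      intro r' hr' hmem
      rcases List.mem_append.mp hmem with h | h
      · exact hb r' (List.mem_cons_of_mem _ hr') h
      · exact hnd.1 ((List.mem_singleton.mp h) ▸ List.mem_map_of_mem hr')
    · rw [if_neg hany,
          show (rules.flatMap fun r => r.2.map fun kw => (kw, c, r.1)) = flatCat c rules from rfl]
      exact ih b hnd.2 (fun r' hr' => hb r' (List.mem_cons_of_mem _ hr'))

-- one category key, end to end: the bucket read out of B's dict fold = A's matchTags
lemma bucket_styles (text : String) :
    (indexB.foldl (indexStep text) initTags).getD "styles" [] = matchTags text styleRules := by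
  rw [getD_foldl_indexStep, indexB_eq]
  simp only [List.foldl_append]
  rw [show initTags.getD "styles" [] = [] from rfl,
      chunk_same text "styles" _ (flatCat_cats _ _),
      flat_fold text "styles" styleRules [] (by decide) (by simp),
      chunk_other text "styles" "use_cases" (by decide) _ (flatCat_cats _ _),
      chunk_other text "styles" "subjects" (by decide) _ (flatCat_cats _ _),
      chunk_other text "styles" "moods" (by decide) _ (flatCat_cats _ _)]
  rfl

lemma bucket_use_cases (text : String) :
    (indexB.foldl (indexStep text) initTags).getD "use_cases" [] = matchTags text usecaseRules := by
  rw [getD_foldl_indexStep, indexB_eq]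
  simp only [List.foldl_append]
  rw [show initTags.getD "use_cases" [] = [] from rfl,
      chunk_other text "use_cases" "styles" (by decide) _ (flatCat_cats _ _),
      chunk_same text "use_cases" _ (flatCat_cats _ _),
      flat_fold text "use_cases" usecaseRules [] (by decide) (by simp),
      chunk_other text "use_cases" "subjects" (by decide) _ (flatCat_cats _ _),
      chunk_other text "use_cases" "moods" (by decide) _ (flatCat_cats _ _)]
  rfl

lemma bucket_subjects (text : String) :
    (indexB.foldl (indexStep text) initTags).getD "subjects" [] = matchTags text subjectRules := by
  rw [getD_foldl_indexStep, indexB_eq]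
  simp only [List.foldl_append]
  rw [show initTags.getD "subjects" [] = [] from rfl,
      chunk_other text "subjects" "styles" (by decide) _ (flatCat_cats _ _),
      chunk_other text "subjects" "use_cases" (by decide) _ (flatCat_cats _ _),
      chunk_same text "subjects" _ (flatCat_cats _ _),
      flat_fold text "subjects" subjectRules [] (by decide) (by simp),
      chunk_other text "subjects" "moods" (by decide) _ (flatCat_cats _ _)]
  rfl

lemma bucket_moods (text : String) :
    (indexB.foldl (indexStep text) initTags).getD "moods" [] = matchTags text moodRules := by
  rw [getD_foldl_indexStep, indexB_eq]
  simp only [List.foldl_append]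
  rw [show initTags.getD "moods" [] = [] from rfl,
      chunk_other text "moods" "styles" (by decide) _ (flatCat_cats _ _),
      chunk_other text "moods" "use_cases" (by decide) _ (flatCat_cats _ _),
      chunk_other text "moods" "subjects" (by decide) _ (flatCat_cats _ _),
      chunk_same text "moods" _ (flatCat_cats _ _),
      flat_fold text "moods" moodRules [] (by decide) (by simp)]
  rfl

-- every triple's category key is already a key of the initial bucket dict
lemma indexB_contains (t : String × String × String) (ht : t ∈ indexB) :
    initTags.contains t.2.1 = true := by
  rw [indexB_eq] at ht
  simp only [List.mem_append] at ht
  rcases ht with ((hs | hu) | hsub) | hm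
  · rw [flatCat_cats _ _ t hs]; decide
  · rw [flatCat_cats _ _ t hu]; decide
  · rw [flatCat_cats _ _ t hsub]; decide
  · rw [flatCat_cats _ _ t hm]; decide

-- the whole result, for an arbitrary text
lemma main_eq (text : String) :
    [("styles", matchTags text styleRules),
     ("use_cases", matchTags text usecaseRules),
     ("subjects", matchTags text subjectRules),
     ("moods", matchTags text moodRules)]
      = (indexB.foldl (indexStep text) initTags).items := by
  have hkeys : (indexB.foldl (indexStep text) initTags).keys = ["styles", "use_cases", "subjects", "moods"] := by
    rw [keys_foldl_indexStep text indexB initTags indexB_contains]; rfl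
  rw [PySem.Dict.items_eq_map_keys _ (by rw [hkeys]; decide) [], hkeys]
  simp only [List.map_cons, List.map_nil]
  rw [bucket_styles, bucket_use_cases, bucket_subjects, bucket_moods]

-- ===== VERDICT (by name: the statement is the Claim_ definition above) =====
theorem tag_prompt_spec : Claim_equal_tag_prompt := by
  intro prompt _
  unfold Spec_tag_prompt tag_prompt tag_prompt_alt
  exact main_eq _
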